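-- pv_equiv track=rewrite | github.com/TwoLion/Coding-Study | Week 4/선택 정렬 11497 - Week 4.py | mini_level
-- ===== SOURCE A (Python) =====
-- def mini_level(number):
--     number = sorted(number)
--     result = [number[0]]*len(number)
--     count = 0
--     for i in range(0, len(number)):
--         if i%2 ==0:
--             result[i//2] = number[i]
--
--         else:
--             result[-(i//2 +1)] = number[i]
--
--     result.append(result[0])
--     count = 0
--     for i in range(len(result)-1):
--         if count < abs(result[i]-result[i+1]):
--             count = abs(result[i]-result[i+1])
--
--     return(count)
-- ===== SOURCE B (Python) =====
-- def mini_level(number):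
--     a = sorted(number)
--     n = len(a)
--     if n == 1:
--         return 0
--     best = max(a[1] - a[0], a[-1] - a[-2])
--     for i in range(n - 2):
--         d = a[i + 2] - a[i]
--         if d > best:
--             best = d
--     return best
-- ===== Notes on version B (the rewrite author's own statement) =====
-- stated objective: simpler
-- what changed: B never builds A's zigzag arrangement: after sorting it folds the two endpoint gaps together with the stride-2 gaps (each element minus the element two places below it) in one direct scan, so no intermediate list is built or re-indexed.
import Mathlib
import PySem

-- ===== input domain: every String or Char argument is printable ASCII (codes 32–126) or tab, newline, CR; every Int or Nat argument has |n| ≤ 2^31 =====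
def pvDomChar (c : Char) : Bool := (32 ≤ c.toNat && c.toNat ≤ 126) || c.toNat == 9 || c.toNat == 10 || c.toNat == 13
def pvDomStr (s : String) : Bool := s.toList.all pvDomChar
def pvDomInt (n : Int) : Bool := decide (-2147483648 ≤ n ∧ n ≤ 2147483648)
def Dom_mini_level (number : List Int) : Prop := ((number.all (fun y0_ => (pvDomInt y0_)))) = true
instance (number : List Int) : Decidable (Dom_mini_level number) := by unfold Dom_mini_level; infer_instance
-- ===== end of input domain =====

-- B replaces A's build-the-zigzag-arrangement-then-scan with a direct stride-2 scan over the
-- sorted list plus the two endpoint gaps (objective: simpler; same O(n log n) cost).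

-- ===== PORT A =====
def mini_level (number : List Int) : Int :=
  let number1 := PySem.List.sorted number (fun x => x)
  -- the first-element access raises IndexError on the empty list; pyGetD is exact under Pre_
  let result0 := List.replicate number1.length (PySem.List.pyGetD number1 0 0)
  let result1 := (PySem.List.pyRange 0 (PySem.List.len number1) 1).foldl
    (fun r i =>
      if PySem.Int.mod i 2 = 0 then
        PySem.List.pySetD r (PySem.Int.floordiv i 2) (PySem.List.pyGetD number1 i 0)
      else
        PySem.List.pySetD r (-(PySem.Int.floordiv i 2 + 1)) (PySem.List.pyGetD number1 i 0))
    result0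
  let result2 := result1 ++ [PySem.List.pyGetD result1 0 0]
  (PySem.List.pyRange 0 (PySem.List.len result2 - 1) 1).foldl
    (fun count i =>
      if count < |PySem.List.pyGetD result2 i 0 - PySem.List.pyGetD result2 (i + 1) 0| then
        |PySem.List.pyGetD result2 i 0 - PySem.List.pyGetD result2 (i + 1) 0|
      else count)
    0

-- ===== PORT B =====
def mini_level_alt (number : List Int) : Int :=
  let a := PySem.List.sorted number (fun x => x)
  let n := PySem.List.len a
  if n = 1 then 0
  else
    -- indexing the sorted list raises IndexError on []; the total forms are exact under Pre_
    let best := max (PySem.List.pyGetD a 1 0 - PySem.List.pyGetD a 0 0)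
                    (PySem.List.pyGetD a (-1) 0 - PySem.List.pyGetD a (-2) 0)
    (PySem.List.pyRange 0 (n - 2) 1).foldl
      (fun best i =>
        let d := PySem.List.pyGetD a (i + 2) 0 - PySem.List.pyGetD a i 0
        if best < d then d else best)
      best

-- ===== PRECONDITION & SPEC =====
-- Pre_ excludes only the empty list, on which A raises IndexError at its first-element access (B raises there too).
def Pre_mini_level (number : List Int) : Prop := number ≠ []
instance (number : List Int) : Decidable (Pre_mini_level number) := by unfold Pre_mini_level; infer_instance
def pvWitness_mini_level : List Int := [3, 1, 2]

def Spec_mini_level (number : List Int) (out : Int) : Prop := out = mini_level_alt number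
instance (number : List Int) (out : Int) : Decidable (Spec_mini_level number out) := by unfold Spec_mini_level; infer_instance

-- ===== CLAIM (what is proved, stated in full; the proofs are below) =====
def Claim_equal_mini_level : Prop := ∀ (number : List Int), Dom_mini_level number → Pre_mini_level number → Spec_mini_level number (mini_level number)

-- ===== LEMMAS AND PROOFS =====

lemma maxIf (c d : Int) : (if c < d then d else c) = max c d := by
  rw [max_def]; split_ifs <;> omega

-- even-index / odd-index elements of a list
def evens : List Int → List Int
  | [] => [] | [x] => [x] | x :: _ :: t => x :: evens t
def odds : List Int → List Int
  | [] => [] | [_] => [] | _ :: y :: t => y :: odds t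

-- the zigzag arrangement A's first loop builds (before the closing append)
def arr (l : List Int) : List Int := evens l ++ (odds l).reverse

lemma length_evens : ∀ l : List Int, (evens l).length = (l.length + 1) / 2
  | [] => rfl
  | [_] => by simp [evens]
  | _ :: _ :: t => by simp [evens, length_evens t]; omega

lemma length_odds : ∀ l : List Int, (odds l).length = l.length / 2
  | [] => rfl
  | [_] => by simp [odds]
  | _ :: _ :: t => by simp [odds, length_odds t]; omega

lemma evens_concat : ∀ (l : List Int) (x : Int),
    evens (l ++ [x]) = if l.length % 2 = 0 then evens l ++ [x] else evens l
  | [], x => rfl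
  | [_], x => rfl
  | a :: b :: t, x => by
    simp only [List.cons_append, evens, evens_concat t x, List.length_cons]
    split_ifs with h1 h2 h2 <;> first | rfl | omega

lemma odds_concat : ∀ (l : List Int) (x : Int),
    odds (l ++ [x]) = if l.length % 2 = 0 then odds l else odds l ++ [x]
  | [], x => rfl
  | [_], x => rfl
  | a :: b :: t, x => by
    simp only [List.cons_append, odds, odds_concat t x, List.length_cons]
    split_ifs with h1 h2 h2 <;> first | rfl | omega

lemma arr_cons_cons (x y : Int) (t : List Int) : arr (x :: y :: t) = x :: (arr t ++ [y]) := by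
  simp [arr, evens, odds]

-- absolute adjacent differences (what A's second loop maxes over)
def adjDiffs (l : List Int) : List Int := List.zipWith (fun a b => |a - b|) l l.tail
-- stride-2 differences (what B's loop maxes over)
def strideDiffs (l : List Int) : List Int := List.zipWith (fun a b => b - a) l l.tail.tail

lemma adjDiffs_cons (x y : Int) (t : List Int) :
    adjDiffs (x :: y :: t) = |x - y| :: adjDiffs (y :: t) := rfl

lemma adjDiffs_concat : ∀ (l : List Int) (h : l ≠ []) (p : Int),
    adjDiffs (l ++ [p]) = adjDiffs l ++ [|l.getLast h - p|]
  | [x], _, p => rfl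
  | x :: y :: t, _, p => by
    have ih := adjDiffs_concat (y :: t) (by simp) p
    have e : (x :: y :: t) ++ [p] = x :: y :: (t ++ [p]) := by simp
    rw [e, adjDiffs_cons, show y :: (t ++ [p]) = (y :: t) ++ [p] from rfl, ih]
    rw [adjDiffs_cons]
    simp [List.getLast_cons]

lemma strideDiffs_cons (x y z : Int) (t : List Int) :
    strideDiffs (x :: y :: z :: t) = (z - x) :: strideDiffs (y :: z :: t) := rfl

lemma fmm : ∀ (l : List Int) (a b : Int), l.foldl max (max a b) = max a (l.foldl max b)
  | [], a, b => rfl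
  | x :: l, a, b => by
    simp only [List.foldl_cons]
    rw [max_assoc, fmm l a (max b x)]

lemma getLast_eq (l : List Int) (h : l ≠ []) (v : Int) (hq : l.getLast? = some v) :
    l.getLast h = v := by
  have h2 := List.getLast?_eq_some_getLast h
  rw [hq] at h2
  exact (Option.some.inj h2).symm

-- Python negative-index assignment r[-j] = v (exact for 0 < j ≤ len r)
lemma pySetD_neg (r : List Int) (j : Nat) (v : Int) (h1 : 0 < j) (h2 : j ≤ r.length) :
    PySem.List.pySetD r (-(j : Int)) v = r.set (r.length - j) v := by
  have hj : ¬ ((0:Int) ≤ -(j:Int)) := by omega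
  have hj2 : (-(r.length:Int) ≤ -(j:Int)) := by omega
  simp only [PySem.List.pySetD, PySem.List.pySet?, PySem.List.pyIdx?, hj, if_false, hj2, if_true,
    neg_neg, Int.toNat_natCast, Option.map_some, Option.getD_some]

lemma replicate_set_last (m : Nat) (d v : Int) (hm : 0 < m) :
    (List.replicate m d).set (m - 1) v = List.replicate (m - 1) d ++ [v] := by
  obtain ⟨m', rfl⟩ : ∃ m', m = m' + 1 := ⟨m - 1, by omega⟩
  simp only [Nat.add_sub_cancel]
  rw [List.replicate_succ', List.set_append_right _ _ (by simp)]
  simp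

-- invariant of A's first loop: after j steps the first ⌈j/2⌉ slots hold the even-indexed
-- elements, the last ⌊j/2⌋ slots the odd-indexed ones in reverse, the middle is untouched
lemma build_inv (s : List Int) (d : Int) :
    ∀ j, j ≤ s.length →
    (List.range j).foldl
      (fun r (k : Nat) =>
        if PySem.Int.mod (k : Int) 2 = 0 then
          PySem.List.pySetD r (PySem.Int.floordiv (k : Int) 2) (PySem.List.pyGetD s (k : Int) 0)
        else
          PySem.List.pySetD r (-(PySem.Int.floordiv (k : Int) 2 + 1)) (PySem.List.pyGetD s (k : Int) 0))
      (List.replicate s.length d)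
    = evens (s.take j) ++ (List.replicate (s.length - j) d ++ (odds (s.take j)).reverse)
  | 0, _ => by simp [evens, odds]
  | (j+1), h => by
    have hj : j < s.length := by omega
    rw [List.range_succ, List.foldl_append, build_inv s d j (by omega)]
    have hmod : PySem.Int.mod (j : Int) 2 = ((j % 2 : Nat) : Int) := by
      exact_mod_cast PySem.Int.mod_natCast j 2
    have hdiv : PySem.Int.floordiv (j : Int) 2 = ((j / 2 : Nat) : Int) := by
      exact_mod_cast PySem.Int.floordiv_natCast j 2
    have hget : PySem.List.pyGetD s (j : Int) 0 = s.getD j 0 := by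
      simp
    have htake : s.take (j+1) = s.take j ++ [s.getD j 0] := by
      rw [List.take_add_one]
      simp [List.getElem?_eq_getElem hj]
    have hlE : (evens (s.take j)).length = (j + 1) / 2 := by
      rw [length_evens, List.length_take_of_le (by omega)]
    have hlO : ((odds (s.take j)).reverse).length = j / 2 := by
      rw [List.length_reverse, length_odds, List.length_take_of_le (by omega)]
    simp only [List.foldl_cons, List.foldl_nil, hmod, hdiv, hget]
    by_cases hpar : j % 2 = 0
    · -- even step: writes s[j] at slot j/2, the first untouched slot
      have hc : ((j % 2 : Nat) : Int) = 0 := by exact_mod_cast hpar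
      rw [if_pos hc, PySem.List.pySetD_natCast]
      rw [htake, evens_concat, odds_concat, List.length_take_of_le (by omega), if_pos hpar, if_pos hpar]
      rw [List.set_append_right _ _ (by omega)]
      rw [show j / 2 - (evens (s.take j)).length = 0 by omega]
      rw [List.set_append (i := 0)]
      rw [if_pos (by simp; omega)]
      rw [show s.length - j = (s.length - (j+1)) + 1 by omega, List.replicate_succ, List.set_cons_zero]
      simp
    · -- odd step: writes s[j] at slot len-1-j/2, the last untouched slot
      have hc0 : ¬ ((j % 2 : Nat) : Int) = 0 := by
        intro hcc; exact hpar (by exact_mod_cast hcc)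
      rw [if_neg hc0]
      set r := evens (s.take j) ++ (List.replicate (s.length - j) d ++ (odds (s.take j)).reverse) with hr
      have hlr : r.length = s.length := by
        simp only [hr, List.length_append, List.length_replicate, hlE, hlO]; omega
      have hc : -(((j / 2 : Nat) : Int) + 1) = -(((j / 2 + 1 : Nat)) : Int) := by push_cast; ring
      rw [hc, pySetD_neg r (j / 2 + 1) _ (by omega) (by omega)]
      rw [htake, evens_concat, odds_concat, List.length_take_of_le (by omega), if_neg hpar, if_neg hpar]
      rw [hr, hlr]
      rw [List.set_append_right _ _ (by rw [hlE]; omega)]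
      rw [List.set_append (i := s.length - (j / 2 + 1) - (evens (s.take j)).length)]
      rw [if_pos (by simp only [List.length_replicate]; rw [hlE]; omega)]
      rw [hlE, show s.length - (j / 2 + 1) - (j + 1) / 2 = (s.length - j) - 1 by omega]
      rw [replicate_set_last _ _ _ (by omega)]
      rw [show s.length - j - 1 = s.length - (j+1) by omega]
      simp

-- A's second loop as a structural fold over the adjacent-difference list
lemma scan_nat : ∀ (l : List Int) (c : Int),
    (List.range (l.length - 1)).foldl (fun c k => max c |l.getD k 0 - l.getD (k+1) 0|) c
    = (adjDiffs l).foldl max c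
  | [], c => rfl
  | [_], c => rfl
  | x :: y :: t, c => by
    rw [show (x :: y :: t).length - 1 = t.length + 1 from by simp, List.range_succ_eq_map]
    simp only [List.foldl_cons, List.foldl_map, adjDiffs_cons]
    have hcg : ∀ (c : Int),
        (List.range t.length).foldl
          (fun c k => max c |(x :: y :: t).getD (Nat.succ k) 0 - (x :: y :: t).getD (Nat.succ k + 1) 0|) c
        = (List.range ((y :: t).length - 1)).foldl
          (fun c k => max c |(y :: t).getD k 0 - (y :: t).getD (k+1) 0|) c := by
      intro c
      rw [show (y :: t).length - 1 = t.length from by simp]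
      apply PySem.List.foldl_congr_mem
      intro acc k _
      simp [Nat.succ_eq_add_one]
    rw [hcg, scan_nat (y :: t)]
    simp [List.getD]

-- B's loop as a structural fold over the stride-2 difference list
lemma strideScan_nat : ∀ (l : List Int) (c : Int),
    (List.range (l.length - 2)).foldl (fun c k => max c (l.getD (k+2) 0 - l.getD k 0)) c
    = (strideDiffs l).foldl max c
  | [], c => rfl
  | [_], c => rfl
  | [_, _], c => rfl
  | x :: y :: z :: t, c => by
    rw [show (x :: y :: z :: t).length - 2 = t.length + 1 from by simp, List.range_succ_eq_map]
    simp only [List.foldl_cons, List.foldl_map, strideDiffs_cons]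
    have hcg : ∀ (c : Int),
        (List.range t.length).foldl
          (fun c k => max c ((x :: y :: z :: t).getD (Nat.succ k + 2) 0 - (x :: y :: z :: t).getD (Nat.succ k) 0)) c
        = (List.range ((y :: z :: t).length - 2)).foldl
          (fun c k => max c ((y :: z :: t).getD (k+2) 0 - (y :: z :: t).getD k 0)) c := by
      intro c
      rw [show (y :: z :: t).length - 2 = t.length from by simp]
      apply PySem.List.foldl_congr_mem
      intro acc k _
      simp [Nat.succ_eq_add_one]
    rw [hcg, strideScan_nat (y :: z :: t)]
    simp [List.getD]

-- the value A computes from the sorted list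
def AVal (s : List Int) : Int := (adjDiffs (arr s ++ [s.getD 0 0])).foldl max 0
-- the value B computes from the sorted list
def BVal (s : List Int) : Int :=
  if s.length = 1 then 0
  else (strideDiffs s).foldl max
    (max (s.getD 1 0 - s.getD 0 0) (s.getD (s.length - 1) 0 - s.getD (s.length - 2) 0))

lemma main_lemma : ∀ (N : Nat) (s : List Int), s.length ≤ N → s ≠ [] →
    s.Pairwise (· ≤ ·) → AVal s = BVal s := by
  intro N
  induction N with
  | zero => intro s hN hne _; rw [Nat.le_zero, List.length_eq_zero_iff] at hN; exact absurd hN hne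
  | succ N ih =>
    intro s hN hne hsort
    match s with
    | [x] => simp [AVal, BVal, arr, evens, odds, adjDiffs]
    | [x, y] =>
      have hxy : x ≤ y := by simp at hsort; exact hsort
      simp only [AVal, BVal, arr, evens, odds, adjDiffs, strideDiffs]
      simp [List.getD]
      have e1 : |x - y| = y - x := by rw [abs_sub_comm]; exact abs_of_nonneg (by omega)
      have e2 : |y - x| = y - x := abs_of_nonneg (by omega)
      simp only [e1, e2]
      refine le_antisymm ?_ ?_ <;> simp only [max_le_iff, le_max_iff] <;> omega
    | [x, y, z] =>
      have hxy : x ≤ y ∧ y ≤ z ∧ x ≤ z := by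
        simp [List.pairwise_cons] at hsort; omega
      simp only [AVal, BVal, arr, evens, odds, adjDiffs, strideDiffs]
      simp [List.getD]
      have e2 : |y - x| = y - x := abs_of_nonneg (by omega)
      have e4 : |z - y| = z - y := abs_of_nonneg (by omega)
      have e5 : |x - z| = z - x := by rw [abs_sub_comm]; exact abs_of_nonneg (by omega)
      simp only [e2, e4, e5]
      refine le_antisymm ?_ ?_ <;> simp only [max_le_iff, le_max_iff] <;> omega
    | x :: y :: a :: b :: u =>
      -- the inductive step: peel the two smallest elements x and y
      have hx := (List.pairwise_cons.1 hsort).1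
      have hsort2 := (List.pairwise_cons.1 hsort).2
      have hy := (List.pairwise_cons.1 hsort2).1
      have hsortt := (List.pairwise_cons.1 hsort2).2
      have hab : a ≤ b := (List.pairwise_cons.1 hsortt).1 b (by simp)
      have hxy : x ≤ y := hx y (by simp)
      have hya : y ≤ a := hy a (by simp)
      have hyb : y ≤ b := hy b (by simp)
      have hxa : x ≤ a := le_trans hxy hya
      have hIH : AVal (a :: b :: u) = BVal (a :: b :: u) :=
        ih _ (by simp at hN ⊢; omega) (by simp) hsortt
      have harrT : arr (a :: b :: u) = a :: (arr u ++ [b]) := arr_cons_cons a b u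
      -- the adjacent-difference list of A's closed arrangement, decomposed
      have hAD : adjDiffs (arr (x :: y :: a :: b :: u) ++ [(x :: y :: a :: b :: u).getD 0 0])
          = |x - a| :: ((adjDiffs (a :: (arr u ++ [b])) ++ [|b - y|]) ++ [|y - x|]) := by
        have e1 : arr (x :: y :: a :: b :: u) ++ [(x :: y :: a :: b :: u).getD 0 0]
            = (x :: a :: ((arr u ++ [b]) ++ [y])) ++ [x] := by
          rw [arr_cons_cons, harrT]; simp
        rw [e1, adjDiffs_concat _ (by simp) x]
        have hgl2 : (x :: a :: ((arr u ++ [b]) ++ [y])).getLast (by simp) = y := by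
          apply getLast_eq
          rw [show x :: a :: ((arr u ++ [b]) ++ [y]) = (x :: a :: arr u ++ [b]) ++ [y] from by simp,
            List.getLast?_concat]
        rw [hgl2, adjDiffs_cons]
        rw [show a :: ((arr u ++ [b]) ++ [y]) = (a :: (arr u ++ [b])) ++ [y] from by simp]
        rw [adjDiffs_concat _ (by simp) y]
        have hgl1 : (a :: (arr u ++ [b])).getLast (by simp) = b := by
          apply getLast_eq
          rw [show a :: (arr u ++ [b]) = (a :: arr u) ++ [b] from by simp, List.getLast?_concat]
        rw [hgl1]
        simp [List.append_assoc]
      have hAvalT : AVal (a :: b :: u)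
          = max ((adjDiffs (a :: (arr u ++ [b]))).foldl max 0) (b - a) := by
        rw [AVal, show (a :: b :: u).getD 0 0 = a from rfl, harrT,
          show a :: (arr u ++ [b]) ++ [a] = (a :: (arr u ++ [b])) ++ [a] from by simp,
          adjDiffs_concat _ (by simp) a]
        have hgl1 : (a :: (arr u ++ [b])).getLast (by simp) = b := by
          apply getLast_eq
          rw [show a :: (arr u ++ [b]) = (a :: arr u) ++ [b] from by simp, List.getLast?_concat]
        rw [hgl1, List.foldl_append]
        simp only [List.foldl_cons, List.foldl_nil]
        rw [abs_of_nonneg (by omega : (0:Int) ≤ b - a)]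
      have hA : AVal (x :: y :: a :: b :: u)
          = max (max (max (a - x) ((adjDiffs (a :: (arr u ++ [b]))).foldl max 0)) (b - y)) (y - x) := by
        rw [AVal, hAD]
        simp only [List.foldl_cons, List.foldl_append, List.foldl_nil]
        rw [abs_sub_comm x a, abs_of_nonneg (by omega : (0:Int) ≤ a - x),
          abs_of_nonneg (by omega : (0:Int) ≤ b - y),
          abs_of_nonneg (by omega : (0:Int) ≤ y - x),
          max_comm (0:Int) (a - x), fmm]
      -- B side
      have hgl1 : (x :: y :: a :: b :: u).getD ((x :: y :: a :: b :: u).length - 1) 0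
          = (a :: b :: u).getD ((a :: b :: u).length - 1) 0 := by
        simp only [List.length_cons]
        rw [show u.length + 1 + 1 + 1 + 1 - 1 = (u.length + 2) + 1 from by omega,
          List.getD_cons_succ,
          show u.length + 2 = (u.length + 1) + 1 from rfl, List.getD_cons_succ]
        rfl
      have hgl2 : (x :: y :: a :: b :: u).getD ((x :: y :: a :: b :: u).length - 2) 0
          = (a :: b :: u).getD ((a :: b :: u).length - 2) 0 := by
        simp only [List.length_cons]
        rw [show u.length + 1 + 1 + 1 + 1 - 2 = (u.length + 1) + 1 from by omega,
          List.getD_cons_succ, List.getD_cons_succ]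
        rfl
      have hBvalT : BVal (a :: b :: u)
          = max (b - a) ((strideDiffs (a :: b :: u)).foldl max
              ((a :: b :: u).getD ((a :: b :: u).length - 1) 0
               - (a :: b :: u).getD ((a :: b :: u).length - 2) 0)) := by
        rw [BVal, if_neg (by simp)]
        rw [show (a :: b :: u).getD 1 0 = b from rfl, show (a :: b :: u).getD 0 0 = a from rfl]
        rw [fmm]
      have hB : BVal (x :: y :: a :: b :: u)
          = max (y - x) (max (a - x) (max (b - y)
              ((strideDiffs (a :: b :: u)).foldl max
                ((a :: b :: u).getD ((a :: b :: u).length - 1) 0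
                 - (a :: b :: u).getD ((a :: b :: u).length - 2) 0)))) := by
        rw [BVal, if_neg (by simp)]
        rw [show (x :: y :: a :: b :: u).getD 1 0 = y from rfl,
          show (x :: y :: a :: b :: u).getD 0 0 = x from rfl, hgl1, hgl2]
        rw [strideDiffs_cons, strideDiffs_cons]
        simp only [List.foldl_cons]
        rw [show max (max (max (y - x)
              ((a :: b :: u).getD ((a :: b :: u).length - 1) 0
               - (a :: b :: u).getD ((a :: b :: u).length - 2) 0)) (a - x)) (b - y)
            = max (y - x) (max (a - x) (max (b - y)
              ((a :: b :: u).getD ((a :: b :: u).length - 1) 0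
               - (a :: b :: u).getD ((a :: b :: u).length - 2) 0))) from by
          refine le_antisymm ?_ ?_ <;> simp only [max_le_iff, le_max_iff] <;> omega]
        rw [fmm, fmm, fmm]
      -- combine via the induction hypothesis
      rw [hA, hB]
      rw [hAvalT, hBvalT] at hIH
      have h5 : (adjDiffs (a :: (arr u ++ [b]))).foldl max 0
          ≤ max (b - a) ((strideDiffs (a :: b :: u)).foldl max
              ((a :: b :: u).getD ((a :: b :: u).length - 1) 0
               - (a :: b :: u).getD ((a :: b :: u).length - 2) 0)) := by
        rw [← hIH]; exact le_max_left _ _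
      have h6 : (strideDiffs (a :: b :: u)).foldl max
              ((a :: b :: u).getD ((a :: b :: u).length - 1) 0
               - (a :: b :: u).getD ((a :: b :: u).length - 2) 0)
          ≤ max ((adjDiffs (a :: (arr u ++ [b]))).foldl max 0) (b - a) := by
        rw [hIH]; exact le_max_right _ _
      refine le_antisymm ?_ ?_ <;> simp only [max_le_iff, le_max_iff] at h5 h6 ⊢ <;> omega

-- bridge: A's first loop (over pyRange) is the Nat-indexed fold the invariant describes
lemma build_bridge (s : List Int) (d : Int) :
    (PySem.List.pyRange 0 (PySem.List.len s) 1).foldl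
      (fun r i =>
        if PySem.Int.mod i 2 = 0 then
          PySem.List.pySetD r (PySem.Int.floordiv i 2) (PySem.List.pyGetD s i 0)
        else
          PySem.List.pySetD r (-(PySem.Int.floordiv i 2 + 1)) (PySem.List.pyGetD s i 0))
      (List.replicate s.length d)
    = arr s := by
  rw [show PySem.List.len s = (s.length : Int) from by simp, PySem.List.pyRange_one]
  rw [show (((s.length : Int)) - 0).toNat = s.length from by omega]
  rw [List.foldl_map]
  simp only [zero_add]
  rw [build_inv s d s.length (le_refl _)]
  simp [arr]

lemma head_bridge (s : List Int) (hne : s ≠ []) :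
    PySem.List.pyGetD (arr s) 0 0 = s.getD 0 0 := by
  match s, hne with
  | [x], _ => simp [arr, evens, odds, PySem.List.pyGetD_zero]
  | x :: y :: t, _ =>
    rw [arr_cons_cons, PySem.List.pyGetD_zero]
    rfl

-- bridge: A's second loop (over pyRange) is the max-fold over adjacent differences
lemma scan_bridge (l : List Int) (c : Int) :
    (PySem.List.pyRange 0 (PySem.List.len l - 1) 1).foldl
      (fun count i =>
        if count < |PySem.List.pyGetD l i 0 - PySem.List.pyGetD l (i + 1) 0| then
          |PySem.List.pyGetD l i 0 - PySem.List.pyGetD l (i + 1) 0|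
        else count) c
    = (adjDiffs l).foldl max c := by
  rw [PySem.List.pyRange_one]
  rw [show ((PySem.List.len l - 1) - 0).toNat = l.length - 1 from by
    simp only [PySem.List.len_eq]; omega]
  rw [List.foldl_map]
  simp only [zero_add]
  have hfun : (fun (count : Int) (k : Nat) =>
      if count < |PySem.List.pyGetD l (k : Int) 0 - PySem.List.pyGetD l ((k : Int) + 1) 0| then
        |PySem.List.pyGetD l (k : Int) 0 - PySem.List.pyGetD l ((k : Int) + 1) 0|
      else count)
      = fun (c : Int) (k : Nat) => max c |l.getD k 0 - l.getD (k + 1) 0| := by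
    funext c k
    have h1 : PySem.List.pyGetD l (k : Int) 0 = l.getD k 0 := by simp
    have h2 : PySem.List.pyGetD l ((k : Int) + 1) 0 = l.getD (k + 1) 0 := by
      exact_mod_cast PySem.List.pyGetD_natCast l (k + 1) 0
    rw [h1, h2, maxIf]
  rw [hfun, scan_nat]

-- bridge: B's loop (over pyRange) is the max-fold over stride-2 differences
lemma stride_bridge (a : List Int) (c : Int) :
    (PySem.List.pyRange 0 ((a.length : Int) - 2) 1).foldl
      (fun best i =>
        if best < PySem.List.pyGetD a (i + 2) 0 - PySem.List.pyGetD a i 0 then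
          PySem.List.pyGetD a (i + 2) 0 - PySem.List.pyGetD a i 0
        else best) c
    = (strideDiffs a).foldl max c := by
  rw [PySem.List.pyRange_one]
  rw [show (((a.length : Int) - 2) - 0).toNat = a.length - 2 from by omega]
  rw [List.foldl_map]
  simp only [zero_add]
  have hfun : (fun (best : Int) (k : Nat) =>
      if best < PySem.List.pyGetD a ((k : Int) + 2) 0 - PySem.List.pyGetD a (k : Int) 0 then
        PySem.List.pyGetD a ((k : Int) + 2) 0 - PySem.List.pyGetD a (k : Int) 0
      else best)
      = fun (c : Int) (k : Nat) => max c (a.getD (k + 2) 0 - a.getD k 0) := by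
    funext c k
    have h1 : PySem.List.pyGetD a (k : Int) 0 = a.getD k 0 := by simp
    have h2 : PySem.List.pyGetD a ((k : Int) + 2) 0 = a.getD (k + 2) 0 := by
      exact_mod_cast PySem.List.pyGetD_natCast a (k + 2) 0
    rw [h1, h2, maxIf]
  rw [hfun, strideScan_nat]

-- ===== VERDICT (by name: the statement is the Claim_ definition above) =====
theorem mini_level_spec : Claim_equal_mini_level := by
  unfold Claim_equal_mini_level
  intro number _ hpre
  unfold Spec_mini_level
  simp only [mini_level, mini_level_alt]
  set s := PySem.List.sorted number (fun x => x) with hs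
  have hlen : s.length = number.length := (PySem.List.sorted_perm number (fun x => x) false).length_eq
  have hne : s ≠ [] := by
    intro h
    exact hpre (List.length_eq_zero_iff.mp (by rw [← hlen, h]; rfl))
  have hsort : s.Pairwise (· ≤ ·) := by
    have := PySem.List.sorted_pairwise number (fun x => x)
    simpa using this
  have hmain := main_lemma s.length s (le_refl _) hne hsort
  unfold AVal BVal at hmain
  rw [build_bridge s (PySem.List.pyGetD s 0 0), head_bridge s hne, scan_bridge]
  rw [show PySem.List.len s = (s.length : Int) from by simp]
  by_cases h1 : s.length = 1
  · rw [if_pos h1] at hmain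
    rw [if_pos (show ((s.length : Int)) = 1 by exact_mod_cast h1)]
    exact hmain
  · have h2 : 2 ≤ s.length := by
      have h0 : s.length ≠ 0 := fun hh => hne (List.length_eq_zero_iff.mp hh)
      omega
    rw [if_neg h1] at hmain
    rw [if_neg (show ¬ ((s.length : Int)) = 1 by exact_mod_cast h1)]
    have hg1 : PySem.List.pyGetD s 1 0 = s.getD 1 0 := by
      exact_mod_cast PySem.List.pyGetD_natCast s 1 0
    have hg0 : PySem.List.pyGetD s 0 0 = s.getD 0 0 := PySem.List.pyGetD_zero s 0
    have hm1 : PySem.List.pyGetD s (-1) 0 = s.getD (s.length - 1) 0 := by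
      rw [PySem.List.pyGetD_neg_ofNat s 1 0 (by norm_num) (by omega),
        (List.getD_eq_getElem s 0 (show s.length - 1 < s.length by omega)).symm]
    have hm2 : PySem.List.pyGetD s (-2) 0 = s.getD (s.length - 2) 0 := by
      rw [PySem.List.pyGetD_neg_ofNat s 2 0 (by norm_num) (by omega),
        (List.getD_eq_getElem s 0 (show s.length - 2 < s.length by omega)).symm]
    rw [hg1, hg0, hm1, hm2, stride_bridge]
    exact hmain
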